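-- pv_equiv track=rewrite | github.com/entropicwarrior/sdoc | tools/build_site.py | extract_meta_style_paths
-- ===== SOURCE A (Python) =====
-- from typing import Dict, List, Optional, Tuple
--
-- def is_heading_line(line: str) -> bool:
--     stripped = line.lstrip()
--     if stripped.startswith("\\#"):
--         return False
--     return stripped.startswith("#")
--
-- def parse_heading(line: str) -> Tuple[str, Optional[str]]:
--     stripped = line.lstrip()
--     i = 0
--     while i < len(stripped) and stripped[i] == "#":
--         i += 1
--     raw = stripped[i:].strip()
--
--     # trailing @id
--     title = raw
--     ident = None
--     parts = raw.split()
--     if parts and parts[-1].startswith("@") and len(parts[-1]) > 1: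
--         if parts[-1][1:].replace("-", "").replace("_", "").isalnum():
--             ident = parts[-1][1:]
--             title = " ".join(parts[:-1]).strip()
--     return title, ident
--
-- def extract_meta_style_paths(text: str) -> Tuple[Optional[str], List[str]]:
--     lines = text.splitlines()
--     stack = []
--     pending_heading = None
--     code_fence = False
--     top_nodes = []
--
--     for line in lines:
--         trimmed_left = line.lstrip()
--         trimmed = trimmed_left.strip()
--
--         if trimmed.startswith("```"):
--             code_fence = not code_fence
--             continue
--         if code_fence:
--             continue
--
--         if trimmed == "":
--             if stack:
--                 stack[-1]["paragraphs"].append("")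
--             continue
--
--         if is_heading_line(trimmed_left):
--             pending_heading = parse_heading(trimmed_left)
--             continue
--
--         if trimmed == "{":
--             if pending_heading:
--                 title, ident = pending_heading
--                 node = {"title": title, "id": ident, "children": [], "paragraphs": []}
--                 if stack:
--                     stack[-1]["children"].append(node)
--                 else:
--                     top_nodes.append(node)
--                 stack.append(node)
--                 pending_heading = None
--             continue
--
--         if trimmed == "}":
--             if stack:
--                 stack.pop()
--             continue
--
--         if stack:
--             stack[-1]["paragraphs"].append(trimmed_left.strip())
--
--     meta_node = None
--     for node in top_nodes:
--         if (node.get("id") or "").lower() == "meta":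
--             meta_node = node
--             break
--
--     if not meta_node:
--         return None, []
--
--     style_path = None
--     style_append_paths: List[str] = []
--
--     for child in meta_node.get("children", []):
--         key = child.get("title", "").strip().lower()
--         text_lines = [line for line in child.get("paragraphs", []) if line.strip()]
--         if not text_lines:
--             continue
--         if key == "style":
--             style_path = text_lines[0].strip()
--         elif key in ("styleappend", "style-append"):
--             style_append_paths.extend([line.strip() for line in text_lines if line.strip()])
--
--     return style_path, style_append_paths
-- ===== SOURCE B (Python) =====
-- from typing import List, Optional, Tuple
--
--
-- def _parse_heading(line: str) -> Tuple[str, Optional[str]]: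
--     stripped = line.lstrip()
--     i = 0
--     while i < len(stripped) and stripped[i] == "#":
--         i += 1
--     raw = stripped[i:].strip()
--     title = raw
--     ident = None
--     parts = raw.split()
--     if parts and parts[-1].startswith("@") and len(parts[-1]) > 1:
--         if parts[-1][1:].replace("-", "").replace("_", "").isalnum():
--             ident = parts[-1][1:]
--             title = " ".join(parts[:-1]).strip()
--     return title, ident
--
--
-- def extract_meta_style_paths(text: str) -> Tuple[Optional[str], List[str]]:
--     # Single pass with an integer depth counter instead of building the whole
--     # node tree: only the direct children of the first top-level @meta node are
--     # ever needed, so we capture just their titles and paragraph lines.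
--     code_fence = False
--     pending = None
--     depth = 0
--     found = False       # the first top-level @meta node has been seen
--     capturing = False   # we are currently inside that node
--     children = []       # finished (title, paragraphs) of meta's direct children
--     cur = None          # the meta child currently open (title, paragraphs)
--
--     for line in text.splitlines():
--         s = line.strip()
--         if s.startswith("```"):
--             code_fence = not code_fence
--             continue
--         if code_fence or s == "":
--             continue
--         if s.startswith("#") and not s.startswith("\\#"):
--             pending = _parse_heading(line)
--             continue
--         if s == "{":
--             if pending is not None:
--                 title, ident = pending
--                 if depth == 0 and not found and (ident or "").lower() == "meta":
--                     found = True
--                     capturing = True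
--                 elif capturing and depth == 1:
--                     if cur is not None:
--                         children.append(cur)
--                     cur = (title, [])
--                 depth += 1
--                 pending = None
--             continue
--         if s == "}":
--             if depth > 0:
--                 depth -= 1
--                 if depth == 0 and capturing:
--                     if cur is not None:
--                         children.append(cur)
--                     cur = None
--                     capturing = False
--             continue
--         if capturing and depth == 2:
--             cur[1].append(s)
--
--     if cur is not None:
--         children.append(cur)
--
--     style_path = None
--     style_append_paths: List[str] = []
--     for title, paras in children:
--         if not paras:
--             continue
--         key = title.strip().lower()
--         if key == "style":
--             style_path = paras[0]
--         elif key in ("styleappend", "style-append"):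
--             style_append_paths.extend(paras)
--     return style_path, style_append_paths
-- ===== Notes on version B (the rewrite author's own statement) =====
-- stated objective: simpler
-- what changed: B replaces A's construction of the full nested node tree (stack of mutable dicts, then a search for the meta node and a scan of its children) by a single pass that keeps only an integer depth, the code-fence flag, the pending heading, and the (title, paragraphs) of the direct children of the first top-level @meta node, extracting the style paths from those captured children.
import Mathlib
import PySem

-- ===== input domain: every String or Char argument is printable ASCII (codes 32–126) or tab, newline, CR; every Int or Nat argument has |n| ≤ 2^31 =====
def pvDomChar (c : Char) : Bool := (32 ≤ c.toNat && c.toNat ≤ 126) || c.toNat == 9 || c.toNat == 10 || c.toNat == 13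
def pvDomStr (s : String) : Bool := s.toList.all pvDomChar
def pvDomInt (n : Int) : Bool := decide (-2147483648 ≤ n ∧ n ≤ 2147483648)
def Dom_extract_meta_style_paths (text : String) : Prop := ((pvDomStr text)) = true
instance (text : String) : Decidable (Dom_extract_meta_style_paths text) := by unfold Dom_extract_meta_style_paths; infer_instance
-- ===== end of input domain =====

-- B avoids building A's node tree: one pass with an integer depth counter that captures
-- only the direct children of the first top-level @meta node (objective: simpler).

-- ===== PORT A =====

-- parse_heading is textually identical in Source A and Source B; one shared transliteration.
def pvParseHeading (line : String) : String × Option String :=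
  let stripped := PySem.Str.lstrip line
  let cs := stripped.toList
  -- while i < len(stripped) and stripped[i] == '#': i += 1
  let i := (cs.takeWhile (fun c => c == '#')).length
  let raw := String.ofList (PySem.Chars.strip (cs.drop i))
  let parts := PySem.Str.split₀ raw
  match parts.getLast? with          -- parts[-1], guarded by `if parts`
  | none => (raw, none)
  | some lastp =>
    if PySem.Str.startswith lastp "@" && decide (1 < lastp.toList.length) then
      -- parts[-1][1:] is lastp.toList.drop 1
      if PySem.Str.strIsalnum
          (PySem.Str.replace (PySem.Str.replace (String.ofList (lastp.toList.drop 1)) "-" "") "_" "") then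
        (PySem.Str.strip (PySem.Str.join " " parts.dropLast), some (String.ofList (lastp.toList.drop 1)))
      else (raw, none)
    else (raw, none)

def pvIsHeadingLine (line : String) : Bool :=
  let stripped := PySem.Str.lstrip line
  if PySem.Str.startswith stripped "\\#" then false
  else PySem.Str.startswith stripped "#"

-- Python's node dicts, mutated in place through aliases held on the stack.  The port keeps
-- the open nodes on the stack and attaches a node to its parent (or to top_nodes) when it is
-- closed or at end of input, which produces the same tree in the same order.
mutual
inductive PvNode : Type where
  | mk : String → Option String → PvNodeList → List String → PvNode
inductive PvNodeList : Type where
  | nil : PvNodeList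
  | cons : PvNode → PvNodeList → PvNodeList
end

def PvNode.title : PvNode → String | .mk t _ _ _ => t
def PvNode.ident : PvNode → Option String | .mk _ i _ _ => i
def PvNode.children : PvNode → PvNodeList | .mk _ _ c _ => c
def PvNode.paras : PvNode → List String | .mk _ _ _ p => p

def PvNodeList.snoc : PvNodeList → PvNode → PvNodeList
  | .nil, n => .cons n .nil
  | .cons x rest, n => .cons x (rest.snoc n)

def PvNode.addPara (n : PvNode) (s : String) : PvNode :=
  .mk n.title n.ident n.children (n.paras ++ [s])

def PvNode.addChild (n : PvNode) (c : PvNode) : PvNode :=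
  .mk n.title n.ident (n.children.snoc c) n.paras

structure PvAState : Type where
  stack : List PvNode        -- innermost open node first
  pending : Option (String × Option String)
  fence : Bool
  tops : PvNodeList          -- closed top-level nodes, in order

-- trimmed_left = line.lstrip(), trimmed = trimmed_left.strip(): inlined below
def pvAStep (st : PvAState) (line : String) : PvAState :=
  if PySem.Str.startswith (PySem.Str.strip (PySem.Str.lstrip line)) "```" then { st with fence := !st.fence }
  else if st.fence then st
  else if PySem.Str.strip (PySem.Str.lstrip line) = "" then
    match st.stack with
    | [] => st
    | h :: rest => { st with stack := h.addPara "" :: rest }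
  else if pvIsHeadingLine (PySem.Str.lstrip line) then
    { st with pending := some (pvParseHeading (PySem.Str.lstrip line)) }
  else if PySem.Str.strip (PySem.Str.lstrip line) = "{" then
    match st.pending with
    | some (t, id) => { st with stack := PvNode.mk t id .nil [] :: st.stack, pending := none }
    | none => st
  else if PySem.Str.strip (PySem.Str.lstrip line) = "}" then
    match st.stack with
    | [] => st
    | [n] => { st with stack := [], tops := st.tops.snoc n }
    | n :: m :: rest => { st with stack := m.addChild n :: rest }
  else
    match st.stack with
    | [] => st
    | h :: rest => { st with stack := h.addPara (PySem.Str.strip (PySem.Str.lstrip line)) :: rest }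

-- attach nodes still open at end of input
def pvFinalize : List PvNode → PvNodeList → PvNodeList
  | [], tp => tp
  | [n], tp => tp.snoc n
  | n :: m :: rest, tp => pvFinalize (m.addChild n :: rest) tp
termination_by st _ => st.length

-- for node in top_nodes: if (node.get("id") or "").lower() == "meta": … break
def pvFirstMeta : PvNodeList → Option PvNode
  | .nil => none
  | .cons n rest =>
    if PySem.Str.lower (n.ident.getD "") = "meta" then some n else pvFirstMeta rest

def pvExtractA : PvNodeList → Option String × List String → Option String × List String
  | .nil, acc => acc
  | .cons c rest, acc =>
    let key := PySem.Str.lower (PySem.Str.strip c.title)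
    let textLines := c.paras.filter (fun l => PySem.Str.strip l ≠ "")
    match textLines with
    | [] => pvExtractA rest acc
    | first :: _ =>
      if key = "style" then pvExtractA rest (some (PySem.Str.strip first), acc.2)
      else if key = "styleappend" ∨ key = "style-append" then
        pvExtractA rest
          (acc.1, acc.2 ++ (textLines.filter (fun l => PySem.Str.strip l ≠ "")).map PySem.Str.strip)
      else pvExtractA rest acc

def extract_meta_style_paths (text : String) : Option String × List String :=
  let fin := (PySem.Str.splitlines text).foldl pvAStep ⟨[], none, false, .nil⟩
  match pvFirstMeta (pvFinalize fin.stack fin.tops) with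
  | none => (none, [])
  | some metaNode => pvExtractA metaNode.children (none, [])

-- ===== PORT B =====

structure PvBState : Type where
  fence : Bool
  pending : Option (String × Option String)
  depth : Nat
  found : Bool
  capturing : Bool
  children : List (String × List String)
  cur : Option (String × List String)

-- s = line.strip(): inlined below
def pvBStep (st : PvBState) (line : String) : PvBState :=
  if PySem.Str.startswith (PySem.Str.strip line) "```" then { st with fence := !st.fence }
  else if st.fence then st
  else if PySem.Str.strip line = "" then st
  else if PySem.Str.startswith (PySem.Str.strip line) "#" && !PySem.Str.startswith (PySem.Str.strip line) "\\#" then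
    { st with pending := some (pvParseHeading line) }
  else if PySem.Str.strip line = "{" then
    match st.pending with
    | none => st
    | some (t, id) =>
      if st.depth = 0 && !st.found && PySem.Str.lower (id.getD "") = "meta" then
        { st with found := true, capturing := true, depth := st.depth + 1, pending := none }
      else if st.capturing && st.depth = 1 then
        { st with children := st.children ++ st.cur.toList, cur := some (t, []),
                  depth := st.depth + 1, pending := none }
      else { st with depth := st.depth + 1, pending := none }
  else if PySem.Str.strip line = "}" then
    if 0 < st.depth then
      if st.depth - 1 = 0 && st.capturing then
        { st with depth := st.depth - 1, children := st.children ++ st.cur.toList,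
                  cur := none, capturing := false }
      else { st with depth := st.depth - 1 }
    else st
  else if st.capturing && st.depth = 2 then
    match st.cur with
    | some (t, ps) => { st with cur := some (t, ps ++ [PySem.Str.strip line]) }
    | none => st
  else st

def pvExtractB : List (String × List String) → Option String × List String → Option String × List String
  | [], acc => acc
  | (t, ps) :: rest, acc =>
    match ps with
    | [] => pvExtractB rest acc
    | first :: _ =>
      let key := PySem.Str.lower (PySem.Str.strip t)
      if key = "style" then pvExtractB rest (some first, acc.2)
      else if key = "styleappend" ∨ key = "style-append" then pvExtractB rest (acc.1, acc.2 ++ ps)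
      else pvExtractB rest acc

def extract_meta_style_paths_alt (text : String) : Option String × List String :=
  let fin := (PySem.Str.splitlines text).foldl pvBStep ⟨false, none, 0, false, false, [], none⟩
  pvExtractB (fin.children ++ fin.cur.toList) (none, [])

-- ===== PRECONDITION & SPEC =====
def Spec_extract_meta_style_paths (text : String) (out : Option String × List String) : Prop := out = extract_meta_style_paths_alt text
instance (text : String) (out : Option String × List String) : Decidable (Spec_extract_meta_style_paths text out) := by unfold Spec_extract_meta_style_paths; infer_instance

-- ===== CLAIM (what is proved, stated in full; the proofs are below) =====
def Claim_equal_extract_meta_style_paths : Prop := ∀ (text : String), Dom_extract_meta_style_paths text → Spec_extract_meta_style_paths text (extract_meta_style_paths text)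

-- ===== LEMMAS AND PROOFS =====

def pvIsMeta (n : PvNode) : Prop := PySem.Str.lower (n.ident.getD "") = "meta"


def pvAbs (n : PvNode) : String × List String := (n.title, n.paras.filter (fun p => p ≠ ""))

def PvNodeList.absL : PvNodeList → List (String × List String)
  | .nil => []
  | .cons n rest => pvAbs n :: rest.absL

def pvParaFix (ps : List String) : Prop := ∀ p ∈ ps, PySem.Str.strip p = p ∧ p ≠ ""

def pvModeRel (stk : List PvNode) (tp : PvNodeList) (found capturing : Bool)
    (children : List (String × List String)) (cur : Option (String × List String)) : Prop :=
  match pvFirstMeta tp with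
  | some m => found = true ∧ capturing = false ∧ cur = none ∧ children = m.children.absL
  | none =>
    (∃ pre m, stk = pre ++ [m] ∧ pvIsMeta m ∧ found = true ∧ capturing = true ∧
        (match pre.getLast? with
         | some c => children = m.children.absL ∧ cur = some (pvAbs c)
         | none => children ++ cur.toList = m.children.absL))
    ∨ ((stk = [] ∨ ∃ pre m, stk = pre ++ [m] ∧ ¬ pvIsMeta m) ∧
        found = false ∧ capturing = false ∧ children = [] ∧ cur = none)

def pvRel (a : PvAState) (b : PvBState) : Prop :=
  b.fence = a.fence ∧ b.pending = a.pending ∧ b.depth = a.stack.length ∧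
  (∀ pr ∈ b.children ++ b.cur.toList, pvParaFix pr.2) ∧
  pvModeRel a.stack a.tops b.found b.capturing b.children b.cur

-- ---- generic char-list lemmas about strip/lstrip/rstrip ----

theorem pv_prefix_append_cases {p l₁ l₂ : List Char} (h : p <+: l₁ ++ l₂) :
    p <+: l₁ ∨ ∃ l', p = l₁ ++ l' ∧ l' <+: l₂ := by
  rw [List.prefix_iff_eq_take] at h
  by_cases hl : p.length ≤ l₁.length
  · left
    rw [h, List.take_append, Nat.sub_eq_zero_of_le hl, List.take_zero, List.append_nil]
    exact List.take_prefix _ _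
  · right
    refine ⟨List.take (p.length - l₁.length) l₂, ?_, List.take_prefix _ _⟩
    conv_lhs => rw [h]
    rw [List.take_append, List.take_of_length_le (by omega)]

theorem pv_rstrip_prefix (cs : List Char) : PySem.Chars.rstrip cs <+: cs := by
  have h := List.dropWhile_suffix (l := cs.reverse) PySem.Chars.isspace
  have := h.reverse
  simpa [PySem.Chars.rstrip] using this

theorem pv_rstrip_split (cs : List Char) :
    ∃ sp, cs = PySem.Chars.rstrip cs ++ sp ∧ ∀ c ∈ sp, PySem.Chars.isspace c = true := by
  refine ⟨(cs.reverse.takeWhile PySem.Chars.isspace).reverse, ?_, ?_⟩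
  · calc cs = cs.reverse.reverse := by simp
      _ = (cs.reverse.takeWhile PySem.Chars.isspace ++ cs.reverse.dropWhile PySem.Chars.isspace).reverse := by
            rw [List.takeWhile_append_dropWhile]
      _ = PySem.Chars.rstrip cs ++ (cs.reverse.takeWhile PySem.Chars.isspace).reverse := by
            rw [List.reverse_append]; rfl
  · intro c hc
    simp only [List.mem_reverse] at hc
    exact List.mem_takeWhile_imp hc

theorem pv_lstrip_idem_chars (cs : List Char) :
    PySem.Chars.lstrip (PySem.Chars.lstrip cs) = PySem.Chars.lstrip cs :=
  List.dropWhile_idempotent _ cs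

theorem pv_lstrip_rstrip (cs : List Char) :
    PySem.Chars.lstrip (PySem.Chars.rstrip (PySem.Chars.lstrip cs)) = PySem.Chars.rstrip (PySem.Chars.lstrip cs) := by
  apply List.dropWhile_eq_self_iff.mpr
  intro h
  have hpre := pv_rstrip_prefix (PySem.Chars.lstrip cs)
  have hlen : 0 < (PySem.Chars.lstrip cs).length := Nat.lt_of_lt_of_le h hpre.length_le
  have hne : cs.dropWhile PySem.Chars.isspace ≠ [] := by
    intro hnil
    simp only [PySem.Chars.lstrip, hnil] at hlen
    simp at hlen
  rw [List.IsPrefix.getElem hpre h]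
  rcases hlst : List.dropWhile PySem.Chars.isspace cs with _ | ⟨a, t⟩
  · exact absurd hlst hne
  · have hhead := List.head_dropWhile_not PySem.Chars.isspace hne
    simp only [hlst, List.head_cons] at hhead
    have hl2 : PySem.Chars.lstrip cs = a :: t := hlst
    simp [hl2, hhead]

theorem pv_rstrip_rstrip (cs : List Char) :
    PySem.Chars.rstrip (PySem.Chars.rstrip cs) = PySem.Chars.rstrip cs := by
  simp only [PySem.Chars.rstrip, List.reverse_reverse, List.dropWhile_idempotent]

theorem pv_strip_idem_chars (cs : List Char) :
    PySem.Chars.strip (PySem.Chars.strip cs) = PySem.Chars.strip cs := by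
  simp only [PySem.Chars.strip]
  rw [pv_lstrip_rstrip, pv_rstrip_rstrip]

theorem pv_strip_lstrip_chars (cs : List Char) :
    PySem.Chars.strip (PySem.Chars.lstrip cs) = PySem.Chars.strip cs := by
  simp only [PySem.Chars.strip, PySem.Chars.lstrip, List.dropWhile_idempotent]

theorem pv_startswith_rstrip (y p : List Char) (h : ∀ c ∈ p, PySem.Chars.isspace c = false) :
    PySem.Chars.startswith (PySem.Chars.rstrip y) p = PySem.Chars.startswith y p := by
  obtain ⟨sp, hy, hsp⟩ := pv_rstrip_split y
  simp only [PySem.Chars.startswith]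
  rw [Bool.eq_iff_iff]
  simp only [List.isPrefixOf_iff_prefix]
  constructor
  · intro hp; exact hp.trans (pv_rstrip_prefix y)
  · intro hp
    rw [hy] at hp
    rcases pv_prefix_append_cases hp with h1 | ⟨l', hpl, hl'⟩
    · exact h1
    · rcases l' with _ | ⟨c, t⟩
      · simpa using List.prefix_iff_eq_take.mpr (by simp [hpl])
      · exfalso
        have hcp : c ∈ p := by rw [hpl]; simp
        have hcsp : c ∈ sp := hl'.subset (by simp)
        have := h c hcp
        rw [hsp c hcsp] at this
        cases this

-- ---- String-level corollaries ----

theorem pv_str_strip_lstrip (line : String) :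
    PySem.Str.strip (PySem.Str.lstrip line) = PySem.Str.strip line := by
  simp [PySem.Str.strip, PySem.Str.lstrip, String.toList_ofList, pv_strip_lstrip_chars]

theorem pv_str_strip_idem (s : String) : PySem.Str.strip (PySem.Str.strip s) = PySem.Str.strip s := by
  simp [PySem.Str.strip, String.toList_ofList, pv_strip_idem_chars]

theorem pv_str_lstrip_idem (s : String) : PySem.Str.lstrip (PySem.Str.lstrip s) = PySem.Str.lstrip s := by
  simp [PySem.Str.lstrip, String.toList_ofList, pv_lstrip_idem_chars]

theorem pv_parse_lstrip (line : String) : pvParseHeading (PySem.Str.lstrip line) = pvParseHeading line := by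
  simp only [pvParseHeading, pv_str_lstrip_idem]

theorem pv_heading_eq (line : String) :
    (PySem.Str.startswith (PySem.Str.strip (PySem.Str.lstrip line)) "#" &&
      !PySem.Str.startswith (PySem.Str.strip (PySem.Str.lstrip line)) "\\#") =
    pvIsHeadingLine (PySem.Str.lstrip line) := by
  unfold pvIsHeadingLine
  rw [pv_str_lstrip_idem]
  have e1 : PySem.Str.startswith (PySem.Str.strip (PySem.Str.lstrip line)) "#" =
      PySem.Str.startswith (PySem.Str.lstrip line) "#" := by
    simp only [PySem.Str.startswith, PySem.Str.strip, PySem.Str.lstrip, String.toList_ofList,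
      PySem.Chars.strip, pv_lstrip_idem_chars]
    refine pv_startswith_rstrip (PySem.Chars.lstrip line.toList) "#".toList ?_
    intro c hc
    rw [show "#".toList = ['#'] from rfl] at hc
    rcases hc with _ | ⟨_, h⟩
    · decide
    · cases h
  have e2 : PySem.Str.startswith (PySem.Str.strip (PySem.Str.lstrip line)) "\\#" =
      PySem.Str.startswith (PySem.Str.lstrip line) "\\#" := by
    simp only [PySem.Str.startswith, PySem.Str.strip, PySem.Str.lstrip, String.toList_ofList,
      PySem.Chars.strip, pv_lstrip_idem_chars]
    refine pv_startswith_rstrip (PySem.Chars.lstrip line.toList) "\\#".toList ?_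
    intro c hc
    rw [show "\\#".toList = ['\\', '#'] from rfl] at hc
    rcases hc with _ | ⟨_, h⟩
    · decide
    · rcases h with _ | ⟨_, h⟩
      · decide
      · cases h
  rw [e1, e2]
  cases h2 : PySem.Str.startswith (PySem.Str.lstrip line) "\\#" <;>
    cases h1 : PySem.Str.startswith (PySem.Str.lstrip line) "#" <;>
      simp only [h1, h2] <;> simp

-- ---- small structural lemmas about the tree ----

theorem pvAbs_addChild (n c : PvNode) : pvAbs (n.addChild c) = pvAbs n := by
  cases n; rfl

theorem pvIsMeta_addChild (n c : PvNode) : pvIsMeta (n.addChild c) ↔ pvIsMeta n := by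
  cases n; exact Iff.rfl

theorem pv_children_addChild (n c : PvNode) : (n.addChild c).children = n.children.snoc c := by
  cases n; rfl

theorem pv_absL_snoc : ∀ (nl : PvNodeList) (n : PvNode),
    (nl.snoc n).absL = nl.absL ++ [pvAbs n]
  | .nil, n => rfl
  | .cons x rest, n => by
      simp only [PvNodeList.snoc, PvNodeList.absL, pv_absL_snoc rest n, List.cons_append]

theorem pvAbs_addPara_ne (n : PvNode) (p : String) (hp : p ≠ "") :
    pvAbs (n.addPara p) = ((pvAbs n).1, (pvAbs n).2 ++ [p]) := by
  cases n with
  | mk t i c ps => simp [PvNode.addPara, pvAbs, PvNode.title, PvNode.paras, List.filter_append, hp]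

theorem pvAbs_addPara_nil (n : PvNode) :
    pvAbs (n.addPara "") = pvAbs n := by
  cases n with
  | mk t i c ps => simp [PvNode.addPara, pvAbs, PvNode.title, PvNode.paras, List.filter_append]

theorem pvIsMeta_addPara (n : PvNode) (p : String) : pvIsMeta (n.addPara p) ↔ pvIsMeta n := by
  cases n; exact Iff.rfl

theorem pv_children_addPara (n : PvNode) (p : String) : (n.addPara p).children = n.children := by
  cases n; rfl

theorem pv_getLast?_cons_ne {α : Type} (a : α) (l : List α) (h : l ≠ []) :
    (a :: l).getLast? = l.getLast? := by
  rcases l with _ | ⟨x, t⟩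
  · exact absurd rfl h
  · rfl

theorem pv_firstMeta_snoc : ∀ (tp : PvNodeList) (n : PvNode),
    pvFirstMeta (tp.snoc n) =
      (match pvFirstMeta tp with
       | some m => some m
       | none => if PySem.Str.lower (n.ident.getD "") = "meta" then some n else none)
  | .nil, n => rfl
  | .cons x rest, n => by
      simp only [PvNodeList.snoc, pvFirstMeta]
      by_cases hx : PySem.Str.lower (x.ident.getD "") = "meta"
      · simp [hx]
      · simp only [hx, if_false, pv_firstMeta_snoc rest n]


theorem pv_cons_eq_append_singleton {x m : PvNode} {rest pre : List PvNode}
    (h : x :: rest = pre ++ [m]) :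
    (pre = [] ∧ x = m ∧ rest = []) ∨ ∃ pre', pre = x :: pre' ∧ rest = pre' ++ [m] := by
  rcases pre with _ | ⟨p0, pre'⟩
  · simp only [List.nil_append, List.cons.injEq] at h
    exact Or.inl ⟨rfl, h.1, h.2⟩
  · simp only [List.cons_append, List.cons.injEq] at h
    exact Or.inr ⟨pre', by rw [h.1], h.2⟩

-- mode relation is unaffected by appending an empty paragraph to the innermost node
theorem pvMode_addPara_nil (hN : PvNode) (rest : List PvNode) (tp : PvNodeList)
    (f cap : Bool) (ch : List (String × List String)) (cur : Option (String × List String))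
    (hm : pvModeRel (hN :: rest) tp f cap ch cur) :
    pvModeRel (hN.addPara "" :: rest) tp f cap ch cur := by
  unfold pvModeRel at hm ⊢
  rcases hFM : pvFirstMeta tp with _ | m0
  · rw [hFM] at hm
    rcases hm with ⟨pre, m, hsteq, hmeta, hfound, hcap, hmatch⟩ | ⟨hshape, hrest⟩
    · rcases pv_cons_eq_append_singleton hsteq with ⟨hpre, hxm, hrest0⟩ | ⟨pre', hpre, hrest0⟩
      · subst hpre hrest0
        refine Or.inl ⟨[], hN.addPara "", by simp, ?_, hfound, hcap, ?_⟩
        · rw [pvIsMeta_addPara]; rw [hxm]; exact hmeta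
        · simp only [List.getLast?_nil] at hmatch ⊢
          rw [pv_children_addPara, hxm]
          simpa using hmatch
      · subst hpre hrest0
        refine Or.inl ⟨hN.addPara "" :: pre', m, by simp, hmeta, hfound, hcap, ?_⟩
        rcases hgl : pre'.getLast? with _ | c
        · have hpre' : pre' = [] := by
            cases pre' with
            | nil => rfl
            | cons x t => simp [List.getLast?_cons] at hgl
          subst hpre'
          simp only [List.getLast?_singleton] at hmatch ⊢
          obtain ⟨h1, h2⟩ := hmatch
          exact ⟨h1, by rw [pvAbs_addPara_nil]; exact h2⟩
        · have hne : pre' ≠ [] := by rintro rfl; simp at hgl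
          rw [pv_getLast?_cons_ne _ _ hne, hgl] at hmatch ⊢
          exact hmatch
    · rcases hshape with hnil | ⟨pre, m, hsteq, hmeta⟩
      · cases hnil
      · rcases pv_cons_eq_append_singleton hsteq with ⟨hpre, hxm, hrest0⟩ | ⟨pre', hpre, hrest0⟩
        · subst hpre hrest0
          refine Or.inr ⟨Or.inr ⟨[], hN.addPara "", by simp, ?_⟩, hrest⟩
          rw [pvIsMeta_addPara, hxm]; exact hmeta
        · subst hpre hrest0
          exact Or.inr ⟨Or.inr ⟨hN.addPara "" :: pre', m, by simp, hmeta⟩, hrest⟩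
  · rw [hFM] at hm; exact hm

theorem pvFix_append_new (ch : List (String × List String)) (cur : Option (String × List String))
    (t : String) (hfix : ∀ pr ∈ ch ++ cur.toList, pvParaFix pr.2) :
    ∀ pr ∈ (ch ++ cur.toList) ++ [(t, ([] : List String))], pvParaFix pr.2 := by
  intro pr hpr
  rcases List.mem_append.mp hpr with h1 | h1
  · exact hfix pr h1
  · rw [List.mem_singleton.mp h1]; intro p hps; simp at hps

theorem pvRel_step (a : PvAState) (b : PvBState) (line : String)
    (h : pvRel a b) : pvRel (pvAStep a line) (pvBStep b line) := by
  obtain ⟨hf, hp, hd, hfix, hmode⟩ := h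
  unfold pvAStep pvBStep
  rw [← pv_str_strip_lstrip line, ← pv_parse_lstrip line, pv_heading_eq line, hf, hp]
  by_cases hFence : PySem.Str.startswith (PySem.Str.strip (PySem.Str.lstrip line)) "```" = true
  · -- fence toggle
    simp only [hFence, if_true]
    exact ⟨rfl, rfl, hd, hfix, hmode⟩
  · simp only [hFence, if_false, Bool.false_eq_true]
    by_cases hFen : a.fence = true
    · simp only [hFen, if_true]
      exact ⟨hf, hp, hd, hfix, hmode⟩
    · have hfen' : a.fence = false := by simpa using hFen
      have hf1 : b.fence = false := hf.trans hfen'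
      simp only [hFen, if_false, Bool.false_eq_true]
      by_cases hEmpty : PySem.Str.strip (PySem.Str.lstrip line) = ""
      · -- blank line: A appends "" to the innermost node, B does nothing
        simp only [hEmpty, if_true]
        rcases hstk : a.stack with _ | ⟨hN, rest⟩
        · simp only []
          exact ⟨hf, hp, hd, hfix, hmode⟩
        · rw [hstk] at hd hmode
          simp only []
          exact ⟨hf1, hp, by simpa using hd, hfix, pvMode_addPara_nil _ _ _ _ _ _ _ hmode⟩
      · simp only [hEmpty, if_false]
        by_cases hHead : pvIsHeadingLine (PySem.Str.lstrip line) = true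
        · -- heading line
          simp only [hHead, if_true]
          exact ⟨rfl, rfl, hd, hfix, hmode⟩
        · simp only [hHead, if_false, Bool.false_eq_true]
          by_cases hOpen : PySem.Str.strip (PySem.Str.lstrip line) = "{"
          · -- "{"
            simp only [hOpen, if_true]
            rcases hpend : a.pending with _ | ⟨t, id⟩
            · dsimp only
              exact ⟨hf, hp, hd, hfix, hmode⟩
            · dsimp only
              unfold pvModeRel at hmode
              rcases hFM : pvFirstMeta a.tops with _ | m0
              · rw [hFM] at hmode
                rcases hmode with ⟨pre, m, hsteq, hmeta, hfound, hcap, hmatch⟩ | ⟨hshape, hfound, hcap, hch, hcur⟩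
                · -- currently inside the meta node
                  have hdep : b.depth = pre.length + 1 := by rw [hd, hsteq]; simp
                  rcases pre with _ | ⟨p0, pre'⟩
                  · -- direct child of meta opens
                    have hd1 : b.depth = 1 := by simpa using hdep
                    simp only [hfound, hcap, hd1, Bool.not_true, Bool.and_false, Bool.false_and,
                      Bool.and_true, decide_true, if_false, if_true, Bool.false_eq_true,
                      Nat.one_ne_zero, decide_false]
                    refine ⟨rfl, rfl, by simp [hsteq], pvFix_append_new _ _ _ hfix, ?_⟩
                    unfold pvModeRel
                    rw [hFM]
                    refine Or.inl ⟨[PvNode.mk t id .nil []], m, by simp [hsteq], hmeta, rfl, rfl, ?_⟩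
                    simp only [List.getLast?_singleton, List.getLast?_nil] at hmatch ⊢
                    exact ⟨hmatch, by simp [pvAbs, PvNode.title, PvNode.paras]⟩
                  · -- deeper open
                    have hc1 : (decide (b.depth = 0) && !b.found && decide (PySem.Str.lower (id.getD "") = "meta")) = false := by
                      simp [hfound]
                    have hc2 : (b.capturing && decide (b.depth = 1)) = false := by
                      simp [hcap, hdep]
                    simp only [hc1, hc2, Bool.false_eq_true, if_false]
                    refine ⟨rfl, rfl, by simp [hd, hsteq], hfix, ?_⟩
                    unfold pvModeRel
                    rw [hFM]
                    refine Or.inl ⟨PvNode.mk t id .nil [] :: p0 :: pre', m, by simp [hsteq], hmeta, hfound, hcap, ?_⟩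
                    rcases hgl : (p0 :: pre').getLast? with _ | c
                    · simp [List.getLast?_cons] at hgl
                    · rw [hgl] at hmatch
                      rw [pv_getLast?_cons_ne _ _ (by simp), hgl]
                      exact hmatch
                · -- meta not seen yet
                  rcases hshape with hnil | ⟨pre, m, hsteq, hmeta⟩
                  · -- stack empty: a top-level node opens
                    have hd0 : b.depth = 0 := by rw [hd, hnil]; simp
                    by_cases hM : PySem.Str.lower (id.getD "") = "meta"
                    · simp only [hfound, hcap, hd0, hM, Bool.not_false, decide_true,
                        Bool.and_self, if_true]
                      refine ⟨rfl, rfl, by simp [hnil], hfix, ?_⟩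
                      unfold pvModeRel
                      rw [hFM]
                      refine Or.inl ⟨[], PvNode.mk t id .nil [], by simp [hnil], ?_, rfl, rfl, ?_⟩
                      · simp [pvIsMeta, PvNode.ident, hM]
                      · simp only [List.getLast?_nil]
                        rw [hch, hcur]
                        simp [PvNode.children, PvNodeList.absL]
                    · simp only [hfound, hcap, hd0, hM, Bool.not_false, decide_true,
                        decide_false, Bool.and_false, Bool.false_and, if_false,
                        Bool.false_eq_true, Bool.and_self]
                      refine ⟨rfl, rfl, by simp [hnil], hfix, ?_⟩
                      unfold pvModeRel
                      rw [hFM]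
                      refine Or.inr ⟨Or.inr ⟨[], PvNode.mk t id .nil [], by simp [hnil], ?_⟩, rfl, rfl, hch, hcur⟩
                      simp [pvIsMeta, PvNode.ident, hM]
                  · -- stack nonempty, bottom not meta
                    have hd0 : ¬ (b.depth = 0) := by rw [hd, hsteq]; simp
                    simp only [hfound, hcap, hd0, Bool.not_false,
                      Bool.and_true, Bool.false_and, if_false, Bool.false_eq_true,
                      decide_false]
                    refine ⟨rfl, rfl, by simp [hd, hsteq], hfix, ?_⟩
                    unfold pvModeRel
                    rw [hFM]
                    exact Or.inr ⟨Or.inr ⟨PvNode.mk t id .nil [] :: pre, m, by simp [hsteq], hmeta⟩, rfl, rfl, hch, hcur⟩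
              · rw [hFM] at hmode
                obtain ⟨hfound, hcap, hcur, hch⟩ := hmode
                simp only [hfound, hcap, Bool.not_true, Bool.and_false, Bool.false_and, if_false,
                  Bool.false_eq_true]
                refine ⟨rfl, rfl, by simp [hd], hfix, ?_⟩
                unfold pvModeRel
                rw [hFM]
                exact ⟨rfl, rfl, hcur, hch⟩
          · simp only [hOpen, if_false]
            by_cases hClose : PySem.Str.strip (PySem.Str.lstrip line) = "}"
            · -- "}"
              simp only [hClose, if_true]
              rcases hstk : a.stack with _ | ⟨n1, rest1⟩
              · -- empty stack: both no-ops
                have hd0 : ¬ (0 < b.depth) := by rw [hd, hstk]; simp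
                simp only [hd0, if_false]
                exact ⟨hf, hp, hd, hfix, hmode⟩
              · rw [hstk] at hd hmode
                rcases rest1 with _ | ⟨n2, rest2⟩
                · -- stack = [n1]: the bottom node closes, is appended to tops
                  have hd1 : b.depth = 1 := by simpa using hd
                  have hpos : 0 < b.depth := by omega
                  simp only [hd1]
                  unfold pvModeRel at hmode
                  rcases hFM : pvFirstMeta a.tops with _ | m0
                  · rw [hFM] at hmode
                    rcases hmode with ⟨pre, m, hsteq, hmeta, hfound, hcap, hmatch⟩ | ⟨hshape, hfound, hcap, hch, hcur⟩
                    · -- the meta node itself closes: B flushes the current child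
                      rcases pv_cons_eq_append_singleton hsteq with ⟨hpre, hxm, hrest0⟩ | ⟨pre', hpre, hrest0⟩
                      · subst hxm
                        simp only [hcap, Nat.sub_self, decide_true, Bool.and_true,
                          Nat.zero_lt_one, if_true]
                        refine ⟨rfl, rfl, by simp [], by simpa using hfix, ?_⟩
                        unfold pvModeRel
                        rw [pv_firstMeta_snoc, hFM]
                        have hm1 : PySem.Str.lower (n1.ident.getD "") = "meta" := hmeta
                        simp only [hm1, if_true]
                        rw [hpre] at hmatch
                        simp only [List.getLast?_nil] at hmatch
                        refine ⟨?_, ?_, ?_, ?_⟩ <;> simp [hfound, hmatch]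
                      · simp at hrest0
                    · -- a non-meta top-level node closes
                      rcases hshape with hnil | ⟨pre, m, hsteq, hmeta⟩
                      · simp at hnil
                      · rcases pv_cons_eq_append_singleton hsteq with ⟨hpre, hxm, hrest0⟩ | ⟨pre', hpre, hrest0⟩
                        · subst hxm
                          simp only [hcap, Nat.sub_self, decide_true, Bool.and_false,
                            Nat.zero_lt_one, Bool.false_eq_true, if_false, if_true]
                          refine ⟨rfl, rfl, by simp [], hfix, ?_⟩
                          unfold pvModeRel
                          rw [pv_firstMeta_snoc, hFM]
                          have hnm : ¬ (PySem.Str.lower (n1.ident.getD "") = "meta") := hmeta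
                          simp only [hnm, if_false]
                          refine Or.inr ⟨Or.inl ?_, ?_, ?_, ?_, ?_⟩ <;> simp [hfound, hch, hcur]
                        · simp at hrest0
                  · rw [hFM] at hmode
                    obtain ⟨hfound, hcap, hcur, hch⟩ := hmode
                    simp only [hcap, Nat.sub_self, decide_true, Bool.and_false,
                      Nat.zero_lt_one, Bool.false_eq_true, if_false, if_true]
                    refine ⟨rfl, rfl, by simp [], hfix, ?_⟩
                    unfold pvModeRel
                    rw [pv_firstMeta_snoc, hFM]
                    refine ⟨?_, ?_, ?_, ?_⟩ <;> simp [hfound, hcur, hch]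
                · -- stack = n1 :: n2 :: rest2: an inner node closes and is attached to its parent
                  have hdge : b.depth = rest2.length + 2 := by simpa using hd
                  have hpos : 0 < b.depth := by omega
                  have hne0 : ¬ (b.depth - 1 = 0) := by omega
                  simp only [hpos, if_true, hne0, decide_false, Bool.false_and,
                    Bool.false_eq_true, if_false]
                  refine ⟨rfl, rfl, by simp [hdge], hfix, ?_⟩
                  unfold pvModeRel at hmode ⊢
                  rcases hFM : pvFirstMeta a.tops with _ | m0
                  · rw [hFM] at hmode
                    rcases hmode with ⟨pre, m, hsteq, hmeta, hfound, hcap, hmatch⟩ | ⟨hshape, hfound, hcap, hch, hcur⟩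
                    · rcases pv_cons_eq_append_singleton hsteq with ⟨hpre, hxm, hrest0⟩ | ⟨pre2, hpre, hrest0⟩
                      · exact absurd hrest0 (by simp)
                      · rcases pv_cons_eq_append_singleton hrest0 with ⟨hpre2, hxm2, hrest2⟩ | ⟨pre3, hpre2, hrest2⟩
                        · -- n2 is the meta node: n1 was the open direct child
                          subst hxm2 hrest2
                          refine Or.inl ⟨[], n2.addChild n1, by simp, (pvIsMeta_addChild _ _).mpr hmeta, hfound, hcap, ?_⟩
                          simp only [List.getLast?_nil]
                          rw [hpre, hpre2] at hmatch
                          simp only [List.getLast?_singleton] at hmatch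
                          obtain ⟨h1, h2⟩ := hmatch
                          rw [h1, h2, pv_children_addChild, pv_absL_snoc]
                          simp
                        · -- deeper: n1 is attached to n2 inside the meta node
                          subst hrest2
                          refine Or.inl ⟨n2.addChild n1 :: pre3, m, by simp, hmeta, hfound, hcap, ?_⟩
                          rcases pre3 with _ | ⟨q, pre4⟩
                          · -- n2 was the direct child
                            rw [hpre, hpre2] at hmatch
                            simp only [List.getLast?_singleton] at hmatch ⊢
                            rw [pv_getLast?_cons_ne _ _ (by simp)] at hmatch
                            simp only [List.getLast?_singleton] at hmatch
                            obtain ⟨h1, h2⟩ := hmatch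
                            exact ⟨h1, by rw [pvAbs_addChild]; exact h2⟩
                          · rw [hpre, hpre2] at hmatch
                            rw [pv_getLast?_cons_ne _ _ (by simp), pv_getLast?_cons_ne _ _ (by simp)] at hmatch
                            rw [pv_getLast?_cons_ne _ _ (by simp)]
                            exact hmatch
                    · rcases hshape with hnil | ⟨pre, m, hsteq, hmeta⟩
                      · simp at hnil
                      · rcases pv_cons_eq_append_singleton hsteq with ⟨hpre, hxm, hrest0⟩ | ⟨pre2, hpre, hrest0⟩
                        · exact absurd hrest0 (by simp)
                        · rcases pv_cons_eq_append_singleton hrest0 with ⟨hpre2, hxm2, hrest2⟩ | ⟨pre3, hpre2, hrest2⟩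
                          · subst hxm2 hrest2
                            refine Or.inr ⟨Or.inr ⟨[], n2.addChild n1, rfl, ?_⟩, hfound, hcap, hch, hcur⟩
                            rw [pvIsMeta_addChild]; exact hmeta
                          · subst hrest2
                            exact Or.inr ⟨Or.inr ⟨n2.addChild n1 :: pre3, m, by simp, hmeta⟩, hfound, hcap, hch, hcur⟩
                  · rw [hFM] at hmode
                    exact hmode
            · -- paragraph line
              simp only [hClose, if_false]
              rcases hstk : a.stack with _ | ⟨hN, rest⟩
              · have hc : (b.capturing && decide (b.depth = 2)) = false := by
                  rcases hcb : b.capturing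
                  · simp
                  · unfold pvModeRel at hmode
                    rcases hFM : pvFirstMeta a.tops with _ | m0 <;> rw [hFM] at hmode
                    · rcases hmode with ⟨pre, m, hsteq, _, _, _, _⟩ | ⟨_, _, hcap, _, _⟩
                      · rw [hstk] at hsteq; simp at hsteq
                      · rw [hcap] at hcb; cases hcb
                    · rw [hmode.2.1] at hcb; cases hcb
                simp only [hc, Bool.false_eq_true, if_false]
                exact ⟨hf, hp, hd, hfix, hmode⟩
              · rw [hstk] at hd hmode
                have hpeq := pv_str_strip_idem (PySem.Str.lstrip line)
                unfold pvModeRel at hmode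
                rcases hFM : pvFirstMeta a.tops with _ | m0
                · rw [hFM] at hmode
                  rcases hmode with ⟨pre, m, hsteq, hmeta, hfound, hcap, hmatch⟩ | ⟨hshape, hfound, hcap, hch, hcur⟩
                  · have hdep : b.depth = pre.length + 1 := by rw [hd, hsteq]; simp
                    rcases pv_cons_eq_append_singleton hsteq with ⟨hpre, hxm, hrest0⟩ | ⟨pre2, hpre, hrest0⟩
                    · -- stack = [meta node]: paragraph goes to the meta node itself
                      subst hxm hrest0
                      have hc : (b.capturing && decide (b.depth = 2)) = false := by
                        rw [hdep, hpre]; simp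
                      simp only [hc, Bool.false_eq_true, if_false]
                      refine ⟨hf1, hp, by simpa using hd, hfix, ?_⟩
                      unfold pvModeRel
                      rw [hFM]
                      refine Or.inl ⟨[], hN.addPara (PySem.Str.strip (PySem.Str.lstrip line)), by simp,
                        (pvIsMeta_addPara _ _).mpr hmeta, hfound, hcap, ?_⟩
                      simp only [List.getLast?_nil]
                      rw [hpre] at hmatch
                      simp only [List.getLast?_nil] at hmatch
                      rw [pv_children_addPara]
                      exact hmatch
                    · rcases pre2 with _ | ⟨q, pre3⟩
                      · -- stack = [child, meta]: B appends the line to the current child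
                        subst hrest0
                        have hd2 : b.depth = 2 := by rw [hdep, hpre]; simp
                        have hc : (b.capturing && decide (b.depth = 2)) = true := by
                          rw [hcap, hd2]; simp
                        simp only [hc, if_true]
                        rw [hpre] at hmatch
                        simp only [List.getLast?_singleton] at hmatch
                        obtain ⟨hch2, hcur2⟩ := hmatch
                        rw [hcur2]
                        dsimp only
                        refine ⟨rfl, rfl, by simpa using hd, ?_, ?_⟩
                        · intro pr hpr
                          rcases List.mem_append.mp hpr with h1 | h1
                          · exact hfix pr (List.mem_append.mpr (Or.inl h1))
                          · rw [List.mem_singleton.mp h1]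
                            intro q hq
                            rcases List.mem_append.mp hq with h2 | h2
                            · have hcf : pvParaFix (pvAbs hN).2 :=
                                hfix (pvAbs hN) (List.mem_append.mpr (Or.inr (by rw [hcur2]; simp)))
                              exact hcf q h2
                            · rw [List.mem_singleton.mp h2]
                              exact ⟨hpeq, hEmpty⟩
                        · unfold pvModeRel
                          rw [hFM]
                          refine Or.inl ⟨[hN.addPara (PySem.Str.strip (PySem.Str.lstrip line))], m,
                            by simp, hmeta, hfound, hcap, ?_⟩
                          simp only [List.getLast?_singleton]
                          refine ⟨hch2, ?_⟩
                          rw [pvAbs_addPara_ne _ _ hEmpty]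
                      · -- deeper than the direct child: B ignores the line
                        subst hrest0
                        have hc : (b.capturing && decide (b.depth = 2)) = false := by
                          rw [hdep, hpre]; simp
                        simp only [hc, Bool.false_eq_true, if_false]
                        refine ⟨hf1, hp, by simpa using hd, hfix, ?_⟩
                        unfold pvModeRel
                        rw [hFM]
                        refine Or.inl ⟨hN.addPara (PySem.Str.strip (PySem.Str.lstrip line)) :: q :: pre3, m,
                          by simp, hmeta, hfound, hcap, ?_⟩
                        rw [hpre] at hmatch
                        rw [pv_getLast?_cons_ne _ _ (by simp)] at hmatch
                        rw [pv_getLast?_cons_ne _ _ (by simp)]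
                        exact hmatch
                  · have hc : (b.capturing && decide (b.depth = 2)) = false := by
                      rw [hcap]; simp
                    simp only [hc, Bool.false_eq_true, if_false]
                    rcases hshape with hnil | ⟨pre, m, hsteq, hmeta⟩
                    · cases hnil
                    · refine ⟨hf1, hp, by simpa using hd, hfix, ?_⟩
                      unfold pvModeRel
                      rw [hFM]
                      rcases pv_cons_eq_append_singleton hsteq with ⟨hpre, hxm, hrest0⟩ | ⟨pre2, hpre, hrest0⟩
                      · subst hxm hrest0
                        refine Or.inr ⟨Or.inr ⟨[], hN.addPara (PySem.Str.strip (PySem.Str.lstrip line)), by simp, ?_⟩,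
                          hfound, hcap, hch, hcur⟩
                        rw [pvIsMeta_addPara]; exact hmeta
                      · subst hrest0
                        exact Or.inr ⟨Or.inr ⟨hN.addPara (PySem.Str.strip (PySem.Str.lstrip line)) :: pre2, m,
                          by simp, hmeta⟩, hfound, hcap, hch, hcur⟩
                · rw [hFM] at hmode
                  obtain ⟨hfound, hcap, hcur, hch⟩ := hmode
                  have hc : (b.capturing && decide (b.depth = 2)) = false := by
                    rw [hcap]; simp
                  simp only [hc, Bool.false_eq_true, if_false]
                  refine ⟨hf1, hp, by simpa using hd, hfix, ?_⟩
                  unfold pvModeRel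
                  rw [hFM]
                  exact ⟨hfound, hcap, hcur, hch⟩


theorem pvRel_foldl (lines : List String) : ∀ (a : PvAState) (b : PvBState), pvRel a b →
    pvRel (lines.foldl pvAStep a) (lines.foldl pvBStep b) := by
  induction lines with
  | nil => intro a b h; exact h
  | cons l ls ih =>
    intro a b h
    simp only [List.foldl_cons]
    exact ih _ _ (pvRel_step a b l h)

-- collapsing the still-open stack into its bottom node
def pvAbsorb (st : List PvNode) (m : PvNode) : PvNode :=
  match st with
  | [] => m
  | n :: rest => m.addChild (rest.foldl (fun acc x => x.addChild acc) n)

theorem pvAbsorb_rec (n p : PvNode) (rest : List PvNode) (m : PvNode) :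
    pvAbsorb (n :: p :: rest) m = pvAbsorb (p.addChild n :: rest) m := rfl

theorem pvFinalize_eq : ∀ (st : List PvNode) (m : PvNode) (tp : PvNodeList),
    pvFinalize (st ++ [m]) tp = tp.snoc (pvAbsorb st m)
  | [], m, tp => by simp [pvFinalize, pvAbsorb]
  | [n], m, tp => by simp [pvFinalize, pvAbsorb]
  | n :: p :: rest, m, tp => by
      have h1 : pvFinalize ((n :: p :: rest) ++ [m]) tp
          = pvFinalize ((p.addChild n :: rest) ++ [m]) tp := by
        simp [pvFinalize]
      rw [h1, pvFinalize_eq (p.addChild n :: rest) m tp, pvAbsorb_rec]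
termination_by st _ _ => st.length

theorem pvAbsorb_lower (st : List PvNode) (m : PvNode) :
    PySem.Str.lower ((pvAbsorb st m).ident.getD "") = PySem.Str.lower (m.ident.getD "") := by
  rcases st with _ | ⟨n, rest⟩
  · rfl
  · cases m; rfl

theorem pvAbs_fold : ∀ (rest : List PvNode) (n : PvNode),
    ∃ c0, (n :: rest).getLast? = some c0 ∧
      pvAbs (rest.foldl (fun acc x => x.addChild acc) n) = pvAbs c0
  | [], n => ⟨n, by simp, rfl⟩
  | r :: rest', n => by
      obtain ⟨c0, h1, h2⟩ := pvAbs_fold rest' (r.addChild n)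
      rcases rest' with _ | ⟨x, xs⟩
      · simp only [List.getLast?_singleton, Option.some.injEq] at h1
        refine ⟨r, by simp, ?_⟩
        rw [List.foldl_cons, List.foldl_nil]
        exact pvAbs_addChild r n
      · refine ⟨c0, ?_, by rw [List.foldl_cons]; exact h2⟩
        rw [pv_getLast?_cons_ne _ _ (by simp), pv_getLast?_cons_ne _ _ (by simp)]
        rw [pv_getLast?_cons_ne _ _ (by simp)] at h1
        exact h1

theorem pvAbsorb_spec (st : List PvNode) (c0 : PvNode) (h : st.getLast? = some c0)
    (m : PvNode) : ∃ c, pvAbsorb st m = m.addChild c ∧ pvAbs c = pvAbs c0 := by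
  rcases st with _ | ⟨n, rest⟩
  · simp at h
  · obtain ⟨c1, h1, h2⟩ := pvAbs_fold rest n
    rw [h] at h1
    refine ⟨rest.foldl (fun acc x => x.addChild acc) n, rfl, ?_⟩
    rw [h2]
    rw [Option.some.injEq] at h1
    rw [h1]

theorem pv_str_strip_empty : PySem.Str.strip "" = "" := rfl

theorem pvExtract_eq : ∀ (nl : PvNodeList) (acc : Option String × List String),
    (∀ pr ∈ nl.absL, pvParaFix pr.2) →
    pvExtractA nl acc = pvExtractB nl.absL acc
  | .nil, acc, _ => rfl
  | .cons c rest, acc, hfix => by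
      have hfixhd : pvParaFix (c.paras.filter (fun p => p ≠ "")) := by
        have := hfix (pvAbs c) (by simp [PvNodeList.absL])
        exact this
      have hfixtl : ∀ pr ∈ rest.absL, pvParaFix pr.2 := by
        intro pr hpr
        exact hfix pr (by simp [PvNodeList.absL, hpr])
      have hfeq : c.paras.filter (fun l => PySem.Str.strip l ≠ "") =
          c.paras.filter (fun p => p ≠ "") := by
        apply List.filter_congr
        intro p hpmem
        by_cases hpe : p = ""
        · subst hpe; simp [pv_str_strip_empty]
        · have hpin : p ∈ c.paras.filter (fun p => p ≠ "") := by
            simp [List.mem_filter, hpmem, hpe]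
          have := (hfixhd p hpin).1
          simp [this, hpe]
      show pvExtractA (.cons c rest) acc = pvExtractB (pvAbs c :: rest.absL) acc
      unfold pvExtractA pvExtractB
      rw [hfeq]
      rcases hps : c.paras.filter (fun p => p ≠ "") with _ | ⟨first, more⟩
      · simp only [pvAbs, hps]
        exact pvExtract_eq rest acc hfixtl
      · simp only [pvAbs, hps]
        have hall : ∀ p ∈ first :: more, PySem.Str.strip p = p ∧ p ≠ "" := by
          intro p hp
          exact hfixhd p (by rw [hps]; exact hp)
        have hfirst : PySem.Str.strip first = first := (hall first (by simp)).1
        have hfilt : (first :: more).filter (fun l => PySem.Str.strip l ≠ "") = first :: more := by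
          apply List.filter_eq_self.mpr
          intro p hp
          have := hall p hp
          simp [this.1, this.2]
        have hmap : (first :: more).map PySem.Str.strip = first :: more := by
          have : (first :: more).map PySem.Str.strip = (first :: more).map id :=
            List.map_congr_left (fun p hp => (hall p hp).1)
          rw [this, List.map_id]
        by_cases hk1 : PySem.Str.lower (PySem.Str.strip c.title) = "style"
        · simp only [hk1, if_true, hfirst]
          exact pvExtract_eq rest _ hfixtl
        · simp only [hk1, if_false]
          by_cases hk2 : PySem.Str.lower (PySem.Str.strip c.title) = "styleappend" ∨
              PySem.Str.lower (PySem.Str.strip c.title) = "style-append"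
          · simp only [hk2, if_true, hfilt, hmap]
            exact pvExtract_eq rest _ hfixtl
          · simp only [hk2, if_false]
            exact pvExtract_eq rest acc hfixtl

theorem pvRel_final (a : PvAState) (b : PvBState) (h : pvRel a b) :
    (match pvFirstMeta (pvFinalize a.stack a.tops) with
     | none => ((none : Option String), ([] : List String))
     | some metaNode => pvExtractA metaNode.children (none, [])) =
    pvExtractB (b.children ++ b.cur.toList) (none, []) := by
  obtain ⟨hf, hp, hd, hfix, hmode⟩ := h
  unfold pvModeRel at hmode
  rcases hFM : pvFirstMeta a.tops with _ | m0
  · rw [hFM] at hmode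
    rcases hmode with ⟨pre, m, hsteq, hmeta, hfound, hcap, hmatch⟩ | ⟨hshape, hfound, hcap, hch, hcur⟩
    · -- the meta node is still open at EOF
      rw [hsteq, pvFinalize_eq, pv_firstMeta_snoc, hFM]
      have hmAbs : PySem.Str.lower ((pvAbsorb pre m).ident.getD "") = "meta" := by
        rw [pvAbsorb_lower]; exact hmeta
      simp only [hmAbs, if_true]
      rcases hgl : pre.getLast? with _ | c0
      · have hpre : pre = [] := by
          rcases pre with _ | ⟨x, t⟩
          · rfl
          · rcases t with _ | ⟨y, t'⟩
            · simp at hgl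
            · rw [pv_getLast?_cons_ne _ _ (by simp)] at hgl
              rcases hg2 : (y :: t').getLast? with _ | z
              · rcases t' with _ | _ <;> simp [List.getLast?_cons] at hg2
              · rw [hg2] at hgl; cases hgl
        subst hpre
        simp only [List.getLast?_nil] at hmatch
        show pvExtractA (pvAbsorb [] m).children (none, []) = _
        rw [show pvAbsorb [] m = m from rfl]
        rw [pvExtract_eq _ _ ?_]
        · rw [hmatch]
        · intro pr hpr
          apply hfix
          rw [hmatch]
          exact hpr
      · rw [hgl] at hmatch
        obtain ⟨hch2, hcur2⟩ := hmatch
        obtain ⟨c, hc1, hc2⟩ := pvAbsorb_spec pre c0 hgl m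
        rw [hc1, pv_children_addChild]
        rw [pvExtract_eq _ _ ?_]
        · rw [pv_absL_snoc, hc2, hch2, hcur2]
          simp
        · rw [pv_absL_snoc, hc2]
          intro pr hpr
          apply hfix
          rw [hch2, hcur2]
          simpa using hpr
    · rcases hshape with hnil | ⟨pre, m, hsteq, hmeta⟩
      · rw [hnil]
        have : pvFinalize [] a.tops = a.tops := by simp [pvFinalize]
        rw [this, hFM, hch, hcur]
        rfl
      · rw [hsteq, pvFinalize_eq, pv_firstMeta_snoc, hFM]
        have hmAbs : ¬ (PySem.Str.lower ((pvAbsorb pre m).ident.getD "") = "meta") := by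
          rw [pvAbsorb_lower]; exact hmeta
        simp only [hmAbs, if_false]
        rw [hch, hcur]
        rfl
  · rw [hFM] at hmode
    obtain ⟨hfound, hcap, hcur, hch⟩ := hmode
    have hkeep : pvFirstMeta (pvFinalize a.stack a.tops) = some m0 := by
      rcases List.eq_nil_or_concat a.stack with hnil | ⟨pre, m, hconc⟩
      · rw [hnil]
        have : pvFinalize [] a.tops = a.tops := by simp [pvFinalize]
        rw [this]; exact hFM
      · rw [hconc, List.concat_eq_append, pvFinalize_eq, pv_firstMeta_snoc, hFM]
    rw [hkeep]
    dsimp only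
    rw [pvExtract_eq _ _ ?_]
    · rw [hch, hcur]; simp
    · intro pr hpr
      apply hfix
      rw [hch, hcur]
      simpa using hpr

-- ===== VERDICT (by name: the statement is the Claim_ definition above) =====
theorem extract_meta_style_paths_spec : Claim_equal_extract_meta_style_paths := by
  intro text _
  unfold Spec_extract_meta_style_paths
  have hinit : pvRel ⟨[], none, false, .nil⟩ ⟨false, none, 0, false, false, [], none⟩ := by
    refine ⟨rfl, rfl, rfl, ?_, ?_⟩
    · intro pr hpr; simp at hpr
    · exact Or.inr ⟨Or.inl rfl, rfl, rfl, rfl, rfl⟩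
  have hrel := pvRel_foldl (PySem.Str.splitlines text) _ _ hinit
  simpa [extract_meta_style_paths, extract_meta_style_paths_alt] using pvRel_final _ _ hrel
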